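-- pv_equiv track=rewrite | github.com/robot1lyj/x-vla-test | evaluation/robot/camera/identify.py | pick_new_device
-- ===== SOURCE A (Python) =====
-- from typing import Dict, Tuple
--
-- def pick_new_device(prev: Dict[int, str], cur: Dict[int, str]) -> Tuple[int, str]:
--     added = [idx for idx in cur.keys() if idx not in prev]
--     if added:
--         idx = added[0]
--         return idx, cur[idx]
--     changed = [idx for idx in cur.keys() if idx in prev and cur[idx] != prev[idx]]
--     if changed:
--         idx = changed[0]
--         return idx, cur[idx]
--     raise RuntimeError("检测到设备变化但无法定位新设备。")
-- ===== SOURCE B (Python) =====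
-- from typing import Dict, Tuple
--
-- def pick_new_device(prev: Dict[int, str], cur: Dict[int, str]) -> Tuple[int, str]:
--     first_changed = None
--     for idx, val in cur.items():
--         if idx not in prev:
--             return idx, val
--         if prev[idx] != val and first_changed is None:
--             first_changed = (idx, val)
--     if first_changed is not None:
--         return first_changed
--     raise RuntimeError("检测到设备变化但无法定位新设备。")
-- ===== Notes on version B (the rewrite author's own statement) =====
-- stated objective: alternative
-- what changed: Replaces A's two full list-comprehension passes (build the whole 'added' list, then the whole 'changed' list) with one pass over cur.items() that early-returns on the first added key and records only the first changed candidate.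
import Mathlib
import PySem

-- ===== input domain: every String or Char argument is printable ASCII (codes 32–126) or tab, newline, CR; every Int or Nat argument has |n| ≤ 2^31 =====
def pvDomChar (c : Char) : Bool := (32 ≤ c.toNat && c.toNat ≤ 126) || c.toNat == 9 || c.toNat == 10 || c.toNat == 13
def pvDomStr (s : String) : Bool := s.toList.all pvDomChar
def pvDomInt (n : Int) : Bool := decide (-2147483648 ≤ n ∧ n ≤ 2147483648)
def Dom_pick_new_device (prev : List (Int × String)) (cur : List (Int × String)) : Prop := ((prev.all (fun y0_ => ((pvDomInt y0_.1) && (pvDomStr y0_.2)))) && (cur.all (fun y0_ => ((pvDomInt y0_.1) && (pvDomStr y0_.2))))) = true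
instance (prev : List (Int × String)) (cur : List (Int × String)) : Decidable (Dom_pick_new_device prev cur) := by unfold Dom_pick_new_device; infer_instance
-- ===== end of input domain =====

-- B replaces A's two full list-comprehension passes by ONE loop over cur that early-returns
-- on the first added key and records only the first changed candidate (objective: alternative).

-- ===== PORT A =====
-- 'idx in prev' on the dict prev (association list, first match)
def pvHas (d : List (Int × String)) (k : Int) : Bool := d.any (fun q => q.1 == k)
-- 'd[idx]' (first match; only used where the key is present)
def pvGet (d : List (Int × String)) (k : Int) : String := ((d.find? (fun q => q.1 == k)).map Prod.snd).getD ""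

def pick_new_device (prev : List (Int × String)) (cur : List (Int × String)) : Int × String :=
  let added := (cur.map Prod.fst).filter (fun idx => !pvHas prev idx)
  match added with
  | idx :: _ => (idx, pvGet cur idx)
  | [] =>
    let changed := (cur.map Prod.fst).filter (fun idx => pvHas prev idx && pvGet cur idx != pvGet prev idx)
    match changed with
    | idx :: _ => (idx, pvGet cur idx)
    | [] => (0, "")   -- Python raises RuntimeError here; excluded by Pre_

-- ===== PORT B =====
def pickLoop (prev : List (Int × String)) : List (Int × String) → Option (Int × String) → Int × String
  | [], fc => fc.getD (0, "")   -- Python raises RuntimeError when fc is None; excluded by Pre_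
  | (idx, val) :: rest, fc =>
    match prev.find? (fun q => q.1 == idx) with
    | none => (idx, val)
    | some q => pickLoop prev rest (if q.2 != val && fc.isNone then some (idx, val) else fc)

def pick_new_device_alt (prev : List (Int × String)) (cur : List (Int × String)) : Int × String :=
  pickLoop prev cur none

-- ===== PRECONDITION & SPEC =====
-- Pre_ excludes (a) inputs with no added and no changed key, on which A raises RuntimeError,
-- and (b) association lists whose keys repeat, which do not represent any Python dict.
def Pre_pick_new_device (prev : List (Int × String)) (cur : List (Int × String)) : Prop :=
  (cur.map Prod.fst).Nodup ∧
  cur.any (fun p => match prev.find? (fun q => q.1 == p.1) with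
                    | none => true
                    | some q => q.2 != p.2) = true
instance (prev : List (Int × String)) (cur : List (Int × String)) : Decidable (Pre_pick_new_device prev cur) := by unfold Pre_pick_new_device; infer_instance

def pvWitness_pick_new_device : (List (Int × String)) × (List (Int × String)) := ([], [(1, "a")])

def Spec_pick_new_device (prev : List (Int × String)) (cur : List (Int × String)) (out : Int × String) : Prop := out = pick_new_device_alt prev cur
instance (prev : List (Int × String)) (cur : List (Int × String)) (out : Int × String) : Decidable (Spec_pick_new_device prev cur out) := by unfold Spec_pick_new_device; infer_instance

-- ===== CLAIM (what is proved, stated in full; the proofs are below) =====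
def Claim_equal_pick_new_device : Prop := ∀ (prev : List (Int × String)) (cur : List (Int × String)), Dom_pick_new_device prev cur → Pre_pick_new_device prev cur → Spec_pick_new_device prev cur (pick_new_device prev cur)

-- ===== LEMMAS AND PROOFS =====

-- the 'added' / 'changed' tests as predicates on PAIRS of cur
def addedP (prev : List (Int × String)) (p : Int × String) : Bool :=
  (prev.find? (fun q => q.1 == p.1)).isNone
def changedP (prev : List (Int × String)) (p : Int × String) : Bool :=
  match prev.find? (fun q => q.1 == p.1) with
  | none => false
  | some q => q.2 != p.2

lemma pvHas_eq (prev : List (Int × String)) (k : Int) :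
    pvHas prev k = (prev.find? (fun q => q.1 == k)).isSome := by
  induction prev with
  | nil => rfl
  | cons q rest ih =>
    simp only [pvHas, List.any_cons, List.find?] at *
    by_cases h : (q.1 == k) = true <;> simp [h, ih]

lemma find?_self_of_nodup (cur : List (Int × String)) (p : Int × String)
    (hnd : (cur.map Prod.fst).Nodup) (hmem : p ∈ cur) :
    cur.find? (fun q => q.1 == p.1) = some p := by
  induction cur with
  | nil => cases hmem
  | cons r rest ih =>
    simp only [List.map_cons, List.nodup_cons] at hnd
    rcases List.mem_cons.mp hmem with h | h
    · subst h; simp [List.find?]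
    · have hne : (r.1 == p.1) = false := by
        simp only [beq_eq_false_iff_ne, ne_eq]
        intro he
        exact hnd.1 (he ▸ List.mem_map_of_mem h)
      simp [List.find?, hne, ih hnd.2 h]

-- loop characterisation: B's one-pass loop returns the first added pair, else the recorded
-- candidate, else the first changed pair, else the default
lemma pickLoop_spec (prev : List (Int × String)) (cur : List (Int × String)) (fc : Option (Int × String)) :
    pickLoop prev cur fc =
      match cur.find? (addedP prev) with
      | some p => p
      | none =>
        match fc with
        | some r => r
        | none => (cur.find? (changedP prev)).getD (0, "") := by
  induction cur generalizing fc with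
  | nil => cases fc <;> rfl
  | cons p rest ih =>
    obtain ⟨idx, val⟩ := p
    simp only [pickLoop]
    cases hf : prev.find? (fun q => q.1 == idx) with
    | none =>
      have ha : addedP prev (idx, val) = true := by simp [addedP, hf]
      simp [List.find?, ha]
    | some q =>
      have ha : addedP prev (idx, val) = false := by simp [addedP, hf]
      have hc : changedP prev (idx, val) = (q.2 != val) := by simp [changedP, hf]
      dsimp only
      rw [ih]
      by_cases hv : (q.2 != val) = true
      · cases fc with
        | none =>
          rw [List.find?_cons_of_neg (by simp [ha]), List.find?_cons_of_pos (hc.trans hv)]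
          simp [hv]
        | some r =>
          rw [List.find?_cons_of_neg (by simp [ha])]
          simp
      · simp only [Bool.not_eq_true] at hv
        rw [List.find?_cons_of_neg (by simp [ha]), List.find?_cons_of_neg (by simp [hc, hv])]
        cases fc <;> simp [hv]

theorem pick_new_device_spec : Claim_equal_pick_new_device := by
  intro prev cur _ hpre
  obtain ⟨hnd, -⟩ := hpre
  unfold Spec_pick_new_device pick_new_device pick_new_device_alt
  rw [pickLoop_spec]
  have hadded : (cur.map Prod.fst).filter (fun idx => !pvHas prev idx)
      = (cur.filter (addedP prev)).map Prod.fst := by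
    rw [List.filter_map]
    congr 1
    apply List.filter_congr
    intro p _
    simp [Function.comp, pvHas_eq, addedP]
  have hchanged : (cur.map Prod.fst).filter
        (fun idx => pvHas prev idx && pvGet cur idx != pvGet prev idx)
      = (cur.filter (changedP prev)).map Prod.fst := by
    rw [List.filter_map]
    congr 1
    apply List.filter_congr
    intro p hp
    have hget : pvGet cur p.1 = p.2 := by
      simp [pvGet, find?_self_of_nodup cur p hnd hp]
    simp only [Function.comp, pvHas_eq, hget, changedP]
    cases hf : prev.find? (fun q => q.1 == p.1) with
    | none => simp
    | some q => simp [pvGet, hf, bne_comm]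
  simp only [hadded, hchanged]
  cases hfa : cur.find? (addedP prev) with
  | some p =>
    have hh : (cur.filter (addedP prev)).head? = some p := by
      rw [List.head?_filter]; exact hfa
    cases hfl : cur.filter (addedP prev) with
    | nil => simp [hfl] at hh
    | cons p' t =>
      simp only [hfl, List.head?_cons, Option.some.injEq] at hh
      have hmem : p' ∈ cur := List.mem_of_mem_filter (hfl ▸ List.mem_cons_self ..)
      rw [hh] at hmem
      simp [pvGet, hh, find?_self_of_nodup cur p hnd hmem]
  | none =>
    have hfl : cur.filter (addedP prev) = [] := by
      rw [List.filter_eq_nil_iff]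
      intro p hp
      have := List.find?_eq_none.mp hfa p hp
      simpa using this
    simp only [hfl, List.map_nil]
    cases hfc : cur.find? (changedP prev) with
    | some p =>
      have hh : (cur.filter (changedP prev)).head? = some p := by
        rw [List.head?_filter]; exact hfc
      cases hcl : cur.filter (changedP prev) with
      | nil => simp [hcl] at hh
      | cons p' t =>
        simp only [hcl, List.head?_cons, Option.some.injEq] at hh
        have hmem : p' ∈ cur := List.mem_of_mem_filter (hcl ▸ List.mem_cons_self ..)
        rw [hh] at hmem
        simp [pvGet, hh, find?_self_of_nodup cur p hnd hmem]
    | none =>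
      have hcl : cur.filter (changedP prev) = [] := by
        rw [List.filter_eq_nil_iff]
        intro p hp
        have := List.find?_eq_none.mp hfc p hp
        simpa using this
      simp [hcl]
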